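-- pv_equiv track=rewrite | github.com/virtuNat/pesterchum-quirks | gradient.py | apply_gradient
-- ===== SOURCE A (Python) =====
-- gradient = ['COLOR1', 'COLOR2', 'COLOR3', 'COLOR4', 'COLOR5', 'COLOR6']
--
-- def apply_gradient(intext):
--     """Surrounds a message in color tags in roughly equal portions."""
--     textlen = len(intext)
--     gradlen = len(gradient)
--     # The maximum number of additional color tags that can fit this message.
--     maxcolors = ((256 - textlen) // 15) - 1
--     if maxcolors < 1:
--         # If the message is too long to fit a single color hex, don't bother.
--         return intext
--     # The set of colors to be used in the tags.
--     usecolors = gradient[: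
--         # If message length is too small, use only as many tags as the length.
--         textlen if textlen < gradlen else
--         # If message length is too large, use only as many tags as can fit.
--         maxcolors if maxcolors < gradlen else
--         # Otherwise, use full gradient.
--         gradlen
--         ]
--     # Break the message into roughly even chunks based on the number of colors.
--     size, extra = divmod(textlen, len(usecolors))
--     textchunks = [
--         # If index is less than the number of extra chars, increment one char to chunk.
--         intext[i*size + min(i, extra):(i+1)*size + min(i+1, extra)]
--         for i in range(len(usecolors))
--         ]
--     # Surround each chunk with the appropriate tag and join them back together.
--     outtext = ''.join(
--         '<c=#%s>%s</c>' % (color, chunk)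
--         for color, chunk in zip(usecolors, textchunks)
--         )
--     return outtext
-- ===== SOURCE B (Python) =====
-- gradient = ['COLOR1', 'COLOR2', 'COLOR3', 'COLOR4', 'COLOR5', 'COLOR6']
--
-- def apply_gradient(intext):
--     """Surrounds a message in color tags in roughly equal portions."""
--     textlen = len(intext)
--     gradlen = len(gradient)
--     maxcolors = ((256 - textlen) // 15) - 1
--     if maxcolors < 1:
--         return intext
--     usecolors = gradient[:
--         textlen if textlen < gradlen else
--         maxcolors if maxcolors < gradlen else
--         gradlen
--         ]
--     size, extra = divmod(textlen, len(usecolors))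
--     # Character-driven state machine: stream the characters one by one; a
--     # countdown `remaining` tells when the current chunk ends.  At zero we
--     # open the next color's tag (first `extra` chunks run one char longer),
--     # and we close a tag the moment its countdown reaches zero again.
--     out = []
--     remaining = 0
--     idx = 0
--     for ch in intext:
--         if remaining == 0:
--             out.append('<c=#%s>' % usecolors[idx])
--             remaining = size + (1 if idx < extra else 0)
--             idx += 1
--         out.append(ch)
--         remaining -= 1
--         if remaining == 0:
--             out.append('</c>')
--     return ''.join(out)
-- ===== Notes on version B (the rewrite author's own statement) =====
-- stated objective: alternative
-- what changed: Replaces A's chunk-level comprehension (each chunk sliced independently via closed-form i*size+min(i,extra) bounds, then zipped with colors) with a character-driven state machine: one streaming pass over the characters with a countdown that opens the next color tag when it hits zero and closes the tag when the chunk completes; no slicing at all.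
import Mathlib
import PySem

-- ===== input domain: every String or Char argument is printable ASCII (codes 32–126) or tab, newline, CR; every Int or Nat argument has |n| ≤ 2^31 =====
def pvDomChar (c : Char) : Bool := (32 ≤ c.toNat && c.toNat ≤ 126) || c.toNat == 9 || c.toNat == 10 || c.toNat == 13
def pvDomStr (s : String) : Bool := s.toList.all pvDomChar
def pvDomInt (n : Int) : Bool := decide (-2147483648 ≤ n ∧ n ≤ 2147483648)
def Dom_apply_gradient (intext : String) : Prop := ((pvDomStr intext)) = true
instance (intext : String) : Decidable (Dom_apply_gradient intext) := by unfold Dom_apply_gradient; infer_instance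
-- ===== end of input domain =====

-- B replaces A's chunk-level slicing (each chunk cut out by closed-form index arithmetic and
-- zipped with its color) by a character-driven state machine: one streaming pass whose countdown
-- opens and closes the color tags; objective: alternative.

-- ===== PORT A =====
def pvGradient : List (List Char) :=
  ["COLOR1".toList, "COLOR2".toList, "COLOR3".toList, "COLOR4".toList, "COLOR5".toList, "COLOR6".toList]

def apply_gradient (intext : String) : String :=
  let t := intext.toList
  let textlen : Int := t.length
  let gradlen : Int := pvGradient.length
  let maxcolors : Int := PySem.Int.floordiv (256 - textlen) 15 - 1
  if maxcolors < 1 then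
    intext
  else
    let usecolors := PySem.List.slice pvGradient none
      (some (if textlen < gradlen then textlen
             else if maxcolors < gradlen then maxcolors else gradlen))
    let size : Int := PySem.Int.floordiv textlen (usecolors.length : Int)
    let extra : Int := PySem.Int.mod textlen (usecolors.length : Int)
    let textchunks := (PySem.List.pyRange 0 (usecolors.length : Int) 1).map
      (fun i => PySem.List.slice t (some (i * size + min i extra))
                                   (some ((i + 1) * size + min (i + 1) extra)))
    let outtext := ((usecolors.zip textchunks).map
      (fun p => "<c=#".toList ++ p.1 ++ ">".toList ++ p.2 ++ "</c>".toList)).flatten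
    String.ofList outtext

-- ===== PORT B =====
-- B's loop body: state = (emitted pieces, countdown of the current chunk, next color index).
-- `usecolors[idx]` is ported with pyGetD; its default branch is unreachable on admitted inputs
-- (the countdown consumes exactly len(usecolors) chunks, which cover the text).
def pvStepB (size extra : Int) (uc : List (List Char))
    (st : List (List Char) × Int × Int) (ch : Char) : List (List Char) × Int × Int :=
  let s1 := if st.2.1 = 0 then
      (st.1 ++ ["<c=#".toList ++ PySem.List.pyGetD uc st.2.2 [] ++ ">".toList],
       size + (if st.2.2 < extra then 1 else 0), st.2.2 + 1)
    else st
  let out2 := s1.1 ++ [[ch]]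
  let rem2 := s1.2.1 - 1
  ((if rem2 = 0 then out2 ++ ["</c>".toList] else out2), rem2, s1.2.2)

def apply_gradient_alt (intext : String) : String :=
  let t := intext.toList
  let textlen : Int := t.length
  let gradlen : Int := pvGradient.length
  let maxcolors : Int := PySem.Int.floordiv (256 - textlen) 15 - 1
  if maxcolors < 1 then
    intext
  else
    let usecolors := PySem.List.slice pvGradient none
      (some (if textlen < gradlen then textlen
             else if maxcolors < gradlen then maxcolors else gradlen))
    let size : Int := PySem.Int.floordiv textlen (usecolors.length : Int)
    let extra : Int := PySem.Int.mod textlen (usecolors.length : Int)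
    let res := t.foldl (pvStepB size extra usecolors) ([], 0, 0)
    String.ofList res.1.flatten

-- ===== PRECONDITION & SPEC =====
-- Pre_ excludes only the empty string, on which both A and B raise ZeroDivisionError
-- (usecolors becomes empty and divmod divides by its length).
def Pre_apply_gradient (intext : String) : Prop := intext.toList ≠ []
instance (intext : String) : Decidable (Pre_apply_gradient intext) := by unfold Pre_apply_gradient; infer_instance
def pvWitness_apply_gradient : String := "hi"

def Spec_apply_gradient (intext : String) (out : String) : Prop := out = apply_gradient_alt intext
instance (intext : String) (out : String) : Decidable (Spec_apply_gradient intext out) := by unfold Spec_apply_gradient; infer_instance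

-- ===== CLAIM (what is proved, stated in full; the proofs are below) =====
def Claim_equal_apply_gradient : Prop := ∀ (intext : String), Dom_apply_gradient intext → Pre_apply_gradient intext → Spec_apply_gradient intext (apply_gradient intext)

-- ===== LEMMAS AND PROOFS =====

-- The pieces B's state machine emits for the color suffix cs starting at color index j over text u.
def pvPieces (size extra : Int) : List (List Char) → Nat → List Char → List (List Char)
  | [], _, _ => []
  | c :: cs, j, u =>
      let L := (size + (if (j : Int) < extra then 1 else 0)).toNat
      ("<c=#".toList ++ c ++ ">".toList) :: (u.take L).map (fun ch => [ch])
        ++ ["</c>".toList] ++ pvPieces size extra cs (j + 1) (u.drop L)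

-- Total length of the chunks for color indices j, j+1, …, j+m-1.
def pvLenSum (size extra : Int) : Nat → Nat → Int
  | _, 0 => 0
  | j, m + 1 => (size + (if (j : Int) < extra then 1 else 0)) + pvLenSum size extra (j + 1) m

lemma pvLenSum_nonneg (size extra : Int) (hsz : 1 ≤ size) :
    ∀ (m j : Nat), 0 ≤ pvLenSum size extra j m := by
  intro m
  induction m with
  | zero => intro j; simp [pvLenSum]
  | succ m ih =>
      intro j
      rw [pvLenSum]
      have := ih (j + 1)
      split_ifs <;> omega

lemma pvLenSum_eq (size extra : Int) :
    ∀ (m j : Nat), pvLenSum size extra j m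
      = m * size + (min ((j : Int) + m) extra - min (j : Int) extra) := by
  intro m
  induction m with
  | zero => intro j; simp [pvLenSum]
  | succ m ih =>
      intro j
      rw [pvLenSum, ih (j + 1)]
      push_cast
      have h : ((m : Int) + 1) * size = m * size + size := by ring
      rw [h]
      split_ifs with hj
      · omega
      · omega

lemma pvFlattenSingleton (v : List Char) : (v.map (fun ch => [ch])).flatten = v := by
  induction v with
  | nil => rfl
  | cons a v ih => simp [ih]

lemma pvInner (size extra : Int) (uc : List (List Char)) :
    ∀ (cs : List Char) (out : List (List Char)) (i : Int), cs ≠ [] →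
      cs.foldl (pvStepB size extra uc) (out, (cs.length : Int), i)
        = (out ++ cs.map (fun ch => [ch]) ++ ["</c>".toList], 0, i) := by
  intro cs
  induction cs with
  | nil => intro out i h; exact absurd rfl h
  | cons ch tail ih =>
      intro out i _
      rw [List.foldl_cons]
      have hne : ¬ ((tail.length : Int) + 1 = 0) := by omega
      have hstep : pvStepB size extra uc (out, ((ch :: tail).length : Int), i) ch
          = ((if (tail.length : Int) = 0 then (out ++ [[ch]]) ++ ["</c>".toList] else out ++ [[ch]]),
             (tail.length : Int), i) := by
        simp only [pvStepB, List.length_cons, Nat.cast_add, Nat.cast_one, if_neg hne]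
        norm_num
      rw [hstep]
      by_cases htail : tail = []
      · subst htail; simp
      · have h0 : ¬ ((tail.length : Int) = 0) := by
          simpa using htail
        rw [if_neg h0, ih (out ++ [[ch]]) i htail]
        simp

lemma pvChunk (size extra : Int) (uc : List (List Char)) (cs : List Char)
    (out : List (List Char)) (i : Int) (hne : cs ≠ [])
    (hl : (cs.length : Int) = size + (if i < extra then 1 else 0)) :
    cs.foldl (pvStepB size extra uc) (out, 0, i)
      = (out ++ ("<c=#".toList ++ PySem.List.pyGetD uc i [] ++ ">".toList)
          :: cs.map (fun ch => [ch]) ++ ["</c>".toList], 0, i + 1) := by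
  obtain ⟨ch, tail, rfl⟩ := List.exists_cons_of_ne_nil hne
  rw [List.foldl_cons]
  have hlt : (tail.length : Int) = size + (if i < extra then 1 else 0) - 1 := by
    simp only [List.length_cons, Nat.cast_add, Nat.cast_one] at hl; omega
  have hstep : pvStepB size extra uc (out, 0, i) ch
      = ((if (tail.length : Int) = 0
            then (out ++ ["<c=#".toList ++ PySem.List.pyGetD uc i [] ++ ">".toList] ++ [[ch]]) ++ ["</c>".toList]
            else out ++ ["<c=#".toList ++ PySem.List.pyGetD uc i [] ++ ">".toList] ++ [[ch]]),
         (tail.length : Int), i + 1) := by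
    simp only [pvStepB]
    norm_num [← hlt, List.append_assoc]
  rw [hstep]
  by_cases htail : tail = []
  · subst htail; simp
  · have h0 : ¬ ((tail.length : Int) = 0) := by simpa using htail
    rw [if_neg h0,
      pvInner size extra uc tail (out ++ ["<c=#".toList ++ PySem.List.pyGetD uc i [] ++ ">".toList] ++ [[ch]]) (i+1) htail]
    simp

lemma pvOuter (size extra : Int) (hsz : 1 ≤ size) (uc : List (List Char)) :
    ∀ (cs : List (List Char)) (j : Nat) (u : List Char) (out : List (List Char)),
      uc.drop j = cs → (u.length : Int) = pvLenSum size extra j cs.length →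
      u.foldl (pvStepB size extra uc) (out, 0, (j : Int))
        = (out ++ pvPieces size extra cs j u, 0, (j : Int) + cs.length) := by
  intro cs
  induction cs with
  | nil =>
      intro j u out _ hlen
      have hu : u = [] := by
        simp only [pvLenSum, List.length_nil] at hlen
        exact List.eq_nil_of_length_eq_zero (by exact_mod_cast hlen)
      subst hu
      simp [pvPieces]
  | cons c cs ih =>
      intro j u out hdrop hlen
      obtain ⟨LInt, hLI⟩ : ∃ L : Int, L = size + (if (j : Int) < extra then 1 else 0) :=
        ⟨_, rfl⟩
      have hL1 : 1 ≤ LInt := by rw [hLI]; split_ifs <;> omega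
      have hrest : 0 ≤ pvLenSum size extra (j + 1) cs.length := pvLenSum_nonneg size extra hsz _ _
      have hlen' : (u.length : Int) = LInt + pvLenSum size extra (j + 1) cs.length := by
        rw [hlen, hLI]; rfl
      obtain ⟨Ln, hLn⟩ : ∃ n : Nat, n = LInt.toNat := ⟨_, rfl⟩
      have hLnu : Ln ≤ u.length := by omega
      have htake : (u.take Ln).length = Ln := by
        rw [List.length_take]; omega
      have hne : u.take Ln ≠ [] := by
        intro h
        rw [h] at htake
        simp at htake
        omega
      have hcast : ((u.take Ln).length : Int) = size + (if (j : Int) < extra then 1 else 0) := by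
        rw [htake, ← hLI]; omega
      have hgetD : PySem.List.pyGetD uc (j : Int) [] = c := by
        rw [PySem.List.pyGetD_natCast]
        have : uc[j]? = some c := by
          rw [← List.head?_drop, hdrop]; rfl
        simp [List.getD, this]
      conv_lhs => rw [← List.take_append_drop Ln u, List.foldl_append,
        pvChunk size extra uc (u.take Ln) out (j : Int) hne hcast]
      have hdrop' : uc.drop (j + 1) = cs := by
        have h1 : uc.drop (j + 1) = (uc.drop j).drop 1 := by
          rw [List.drop_drop]
        rw [h1, hdrop]; rfl
      have hlen2 : ((u.drop Ln).length : Int) = pvLenSum size extra (j + 1) cs.length := by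
        rw [List.length_drop]; omega
      have hj1 : ((j : Int) + 1) = ((j + 1 : Nat) : Int) := by push_cast; ring
      rw [hj1, ih (j + 1) (u.drop Ln) _ hdrop' hlen2]
      have hLn' : (size + (if (j : Int) < extra then 1 else 0)).toNat = Ln := by
        rw [hLn, hLI]
      rw [hgetD]
      simp only [pvPieces, hLn', List.append_assoc, List.cons_append, List.length_cons]
      push_cast
      have h3 : (j : Int) + 1 + (cs.length : Int) = (j : Int) + ((cs.length : Int) + 1) := by ring
      rw [h3]

lemma pvPieces_flatten (size extra : Int) (hsz : 1 ≤ size) (hex : 0 ≤ extra) (t : List Char) :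
    ∀ (cs : List (List Char)) (j : Nat) (u : List Char),
      u = t.drop ((j : Int) * size + min (j : Int) extra).toNat →
      (pvPieces size extra cs j u).flatten
        = ((cs.zip ((PySem.List.pyRange (j : Int) ((j : Int) + cs.length) 1).map
              (fun i => PySem.List.slice t (some (i * size + min i extra))
                                           (some ((i + 1) * size + min (i + 1) extra))))).map
            (fun p => "<c=#".toList ++ p.1 ++ ">".toList ++ p.2 ++ "</c>".toList)).flatten := by
  intro cs
  induction cs with
  | nil =>
      intro j u _
      simp [pvPieces, PySem.List.pyRange_one_eq_nil (le_refl ((j : Int)))]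
  | cons c cs ih =>
      intro j u hu
      obtain ⟨LInt, hLI⟩ : ∃ L : Int, L = size + (if (j : Int) < extra then 1 else 0) :=
        ⟨_, rfl⟩
      have hL1 : 1 ≤ LInt := by rw [hLI]; split_ifs <;> omega
      obtain ⟨Ln, hLn⟩ : ∃ n : Nat, n = LInt.toNat := ⟨_, rfl⟩
      have hszn : 0 ≤ size := by omega
      have hmin0 : 0 ≤ min ((j : Int)) extra := by
        have : (0 : Int) ≤ (j : Int) := Int.natCast_nonneg j
        omega
      have h0 : 0 ≤ (j : Int) * size + min ((j : Int)) extra := by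
        have := mul_nonneg (Int.natCast_nonneg j) hszn
        omega
      have hmul : ((j : Int) + 1) * size = (j : Int) * size + size := by ring
      have hdelta : ((j : Int) + 1) * size + min ((j : Int) + 1) extra
          = ((j : Int) * size + min ((j : Int)) extra) + LInt := by
        rw [hmul, hLI]; split_ifs with h <;> omega
      have h0' : 0 ≤ ((j : Int) + 1) * size + min ((j : Int) + 1) extra := by
        rw [hdelta]; omega
      have hslice : PySem.List.slice t (some ((j : Int) * size + min ((j : Int)) extra))
            (some (((j : Int) + 1) * size + min ((j : Int) + 1) extra)) = u.take Ln := by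
        rw [PySem.List.slice_toNat t h0 h0', ← hu]
        congr 1
        omega
      have hu' : u.drop Ln = t.drop ((((j + 1 : Nat) : Int)) * size + min (((j + 1 : Nat) : Int)) extra).toNat := by
        rw [hu, List.drop_drop]
        congr 1
        push_cast
        omega
      have hcons : PySem.List.pyRange ((j : Int)) ((j : Int) + ((c :: cs).length : Int)) 1
          = (j : Int) :: PySem.List.pyRange ((j : Int) + 1) ((j : Int) + ((c :: cs).length : Int)) 1 := by
        apply PySem.List.pyRange_one_cons
        simp only [List.length_cons]
        push_cast
        omega
      have hb : (j : Int) + ((c :: cs).length : Int) = ((j + 1 : Nat) : Int) + (cs.length : Int) := by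
        simp only [List.length_cons]; push_cast; omega
      have ha : (j : Int) + 1 = ((j + 1 : Nat) : Int) := by push_cast; omega
      rw [hcons, hb, ha]
      simp only [List.zip_cons_cons, List.map_cons, List.flatten_cons, hslice]
      rw [← ih (j + 1) (u.drop Ln) hu']
      simp only [pvPieces, ← hLI, ← hLn, List.flatten_cons, List.flatten_append,
        pvFlattenSingleton, List.append_assoc, List.flatten_nil, List.nil_append]

-- ===== VERDICT (by name: the statement is the Claim_ definition above) =====
theorem apply_gradient_spec : Claim_equal_apply_gradient := by
  intro intext _ hpre
  unfold Spec_apply_gradient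
  unfold Pre_apply_gradient at hpre
  unfold apply_gradient apply_gradient_alt
  have htl : 1 ≤ (intext.toList.length : Int) := by
    have h0 : 0 < intext.toList.length := List.length_pos_iff.mpr hpre
    omega
  by_cases hm : PySem.Int.floordiv (256 - (intext.toList.length : Int)) 15 - 1 < 1
  · simp only [if_pos hm]
  · simp only [if_neg hm]
    set t := intext.toList with ht
    set b : Int := (if (t.length : Int) < (pvGradient.length : Int)
        then (t.length : Int)
        else if PySem.Int.floordiv (256 - (t.length : Int)) 15 - 1 < (pvGradient.length : Int)
        then PySem.Int.floordiv (256 - (t.length : Int)) 15 - 1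
        else (pvGradient.length : Int)) with hb
    have h6 : (pvGradient.length : Int) = 6 := by decide
    have hb1 : 1 ≤ b := by
      rw [hb]; split_ifs <;> omega
    have hble : b ≤ (t.length : Int) ∧ b ≤ 6 := by
      rw [hb]; split_ifs <;> omega
    set usecolors := PySem.List.slice pvGradient none (some b) with hu
    have hucl : (usecolors.length : Int) = b := by
      rw [hu, PySem.List.slice_to pvGradient (by omega)]
      rw [List.length_take]
      have h6' : pvGradient.length = 6 := by decide
      omega
    set size : Int := PySem.Int.floordiv (t.length : Int) (usecolors.length : Int) with hs
    set extra : Int := PySem.Int.mod (t.length : Int) (usecolors.length : Int) with he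
    have hbpos : (0 : Int) < (usecolors.length : Int) := by omega
    have hex : 0 ≤ extra := PySem.Int.mod_nonneg _ hbpos
    have hexlt : extra < b := by
      have := PySem.Int.mod_lt (t.length : Int) hbpos
      omega
    have hsz : 1 ≤ size := by
      rw [hs, PySem.Int.le_floordiv_iff_mul_le hbpos]
      omega
    have hdm : size * (usecolors.length : Int) + extra = (t.length : Int) :=
      PySem.Int.floordiv_mul_add_mod _ _
    have hlenEq : (t.length : Int) = pvLenSum size extra 0 usecolors.length := by
      rw [pvLenSum_eq size extra usecolors.length 0]
      simp only [Nat.cast_zero, zero_add]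
      have hmin1 : min ((usecolors.length : Int)) extra = extra := by omega
      have hmin2 : min (0 : Int) extra = 0 := by omega
      rw [hmin1, hmin2]
      have : (usecolors.length : Int) * size = size * (usecolors.length : Int) := by ring
      omega
    have houter := pvOuter size extra hsz usecolors usecolors 0 t []
      (by simp) (by simpa using hlenEq)
    simp only [Nat.cast_zero] at houter
    rw [houter]
    have hflat := pvPieces_flatten size extra hsz hex t usecolors 0 t
      (by simp [hex])
    simp only [Nat.cast_zero, zero_add] at hflat
    rw [List.nil_append, hflat]
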